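-- pv_equiv track=rewrite | github.com/L1saM/DADSAassignmentB_Year2 | Task2.py | sorting_patient_weight
-- ===== SOURCE A (Python) =====
-- def sort_patient_age(array):
--     #Sorts patients in the array based on age
--     n = len(array)
--     for z in range(n-1):
--         for x in range(0, n-z-1):
--             if array[x][1] < array[x+1][1]:
--                 array[x], array[x+1] = array[x+1], array[x]
--
-- def sorting_patient_weight(arr):
--     # Patient list
--     sorting = [[], [], [], []]
--     for i in range(len(arr)):
--         # Obese weight class
--         if "Obese" in arr[i]:
--             sorting[0].append(arr[i])
--             # Underweight weight class
--         elif "Underweight" in arr[i]: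
--             sorting[1].append(arr[i])
--             # Overweight weight class
--         elif "Overweight" in arr[i]:
--             sorting[2].append(arr[i])
--             # Normal weight class
--         elif "Normal" in arr[i]:
--             sorting[3].append(arr[i])
--
-- # Sorts through patients ages running from oldest - youngest in each weight class
--     sort_patient_age(sorting[0])
--     sort_patient_age(sorting[1])
--     sort_patient_age(sorting[2])
--     sort_patient_age(sorting[3])
--     rows = []
--     for item in sorting:
--         rows.extend(item)
--
--     return rows
-- ===== SOURCE B (Python) =====
-- def _prio(p):
--     # first-match class priority, same chain as the spec; 4 = unclassified (dropped)
--     if "Obese" in p: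
--         return 0
--     if "Underweight" in p:
--         return 1
--     if "Overweight" in p:
--         return 2
--     if "Normal" in p:
--         return 3
--     return 4
--
--
-- def sorting_patient_weight(arr):
--     kept = [p for p in arr if _prio(p) < 4]
--     by_age = sorted(kept, key=lambda p: p[1], reverse=True)
--     return sorted(by_age, key=_prio)
-- ===== Notes on version B (the rewrite author's own statement) =====
-- stated objective: simpler
-- what changed: Replaces the four-bucket partition plus a hand-written bubble sort per bucket by one filtered list and a single two-stage stable library sort (by age descending, then by class priority ascending).
-- outside the precondition, e.g. on sorting_patient_weight([['Obese']]): A returns [['Obese']], B raises IndexError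
import Mathlib
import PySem

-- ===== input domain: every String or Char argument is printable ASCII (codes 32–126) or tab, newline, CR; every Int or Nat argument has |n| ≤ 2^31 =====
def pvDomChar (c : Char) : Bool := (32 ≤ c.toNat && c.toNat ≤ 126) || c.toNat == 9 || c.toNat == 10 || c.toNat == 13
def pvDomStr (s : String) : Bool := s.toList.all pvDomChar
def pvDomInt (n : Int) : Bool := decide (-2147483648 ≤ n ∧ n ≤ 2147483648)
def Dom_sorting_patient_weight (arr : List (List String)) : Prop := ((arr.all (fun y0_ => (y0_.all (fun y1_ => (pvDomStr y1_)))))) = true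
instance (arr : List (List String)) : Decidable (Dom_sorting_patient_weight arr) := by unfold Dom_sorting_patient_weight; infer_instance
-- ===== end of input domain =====

-- B replaces A's four-bucket partition + per-bucket bubble sort by one two-stage stable sort; objective: simpler.
-- The equality proved is about return values; neither program mutates `arr` (A only reorders its own local bucket lists).

-- ===== PORT A =====
-- `array[x][1]` / `array[x]` are read with getD defaults; under Pre_ every index A takes is in
-- range, where getD is exactly Python indexing.
def pvKey (p : List String) : String := p.getD 1 ""

def pvStepA (a : List (List String)) (x : Nat) : List (List String) :=
  if pvKey (a.getD x []) < pvKey (a.getD (x+1) []) then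
    (a.set x (a.getD (x+1) [])).set (x+1) (a.getD x [])
  else a

def sort_patient_age (array : List (List String)) : List (List String) :=
  (List.range (array.length - 1)).foldl
    (fun a z => (List.range (array.length - z - 1)).foldl pvStepA a) array

def pvPartStep (s : List (List String) × List (List String) × List (List String) × List (List String))
    (p : List String) :
    List (List String) × List (List String) × List (List String) × List (List String) :=
  if "Obese" ∈ p then (s.1 ++ [p], s.2.1, s.2.2.1, s.2.2.2)
  else if "Underweight" ∈ p then (s.1, s.2.1 ++ [p], s.2.2.1, s.2.2.2)
  else if "Overweight" ∈ p then (s.1, s.2.1, s.2.2.1 ++ [p], s.2.2.2)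
  else if "Normal" ∈ p then (s.1, s.2.1, s.2.2.1, s.2.2.2 ++ [p])
  else s

def sorting_patient_weight (arr : List (List String)) : List (List String) :=
  let s := (List.range arr.length).foldl (fun s i => pvPartStep s (arr.getD i [])) ([], [], [], [])
  sort_patient_age s.1 ++ sort_patient_age s.2.1 ++ sort_patient_age s.2.2.1 ++ sort_patient_age s.2.2.2

-- ===== PORT B =====
def pvPrio (p : List String) : Nat :=
  if "Obese" ∈ p then 0
  else if "Underweight" ∈ p then 1
  else if "Overweight" ∈ p then 2
  else if "Normal" ∈ p then 3
  else 4

-- `p[1]` is read with getD; under Pre_ every kept patient has length ≥ 2, where getD is Python `p[1]`.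
def sorting_patient_weight_alt (arr : List (List String)) : List (List String) :=
  let kept := arr.filter (fun p => decide (pvPrio p < 4))
  let byAge := PySem.List.sorted kept (fun p => p.getD 1 "") true
  PySem.List.sorted byAge pvPrio false

-- ===== PRECONDITION & SPEC =====
-- Pre_ excludes inputs containing a weight-classified patient record with fewer than 2 fields: on
-- those Python raises IndexError reading p[1] (A as soon as such a record shares a bucket with a
-- second record, B always, since its sort key touches every kept record).
def Pre_sorting_patient_weight (arr : List (List String)) : Prop :=
  ∀ p ∈ arr, ("Obese" ∈ p ∨ "Underweight" ∈ p ∨ "Overweight" ∈ p ∨ "Normal" ∈ p) → 2 ≤ p.length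
instance (arr : List (List String)) : Decidable (Pre_sorting_patient_weight arr) := by
  unfold Pre_sorting_patient_weight; infer_instance

def pvWitness_sorting_patient_weight : List (List String) :=
  [["Bob", "52", "Obese"], ["Amy", "33", "Normal"], ["Cal", "52", "Obese"], ["Dee", "9", "thin"]]

def Spec_sorting_patient_weight (arr : List (List String)) (out : List (List String)) : Prop :=
  out = sorting_patient_weight_alt arr
instance (arr : List (List String)) (out : List (List String)) :
    Decidable (Spec_sorting_patient_weight arr out) := by
  unfold Spec_sorting_patient_weight; infer_instance

-- ===== CLAIM (what is proved, stated in full; the proofs are below) =====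
def Claim_equal_sorting_patient_weight : Prop :=
  ∀ (arr : List (List String)), Dom_sorting_patient_weight arr →
    Pre_sorting_patient_weight arr →
    Spec_sorting_patient_weight arr (sorting_patient_weight arr)

-- ===== LEMMAS AND PROOFS =====

-- ---- descending stable insertion (what PySem.List.sorted · pvKey true does) ----
def pvIns (x : List String) (s : List (List String)) : List (List String) :=
  PySem.List.insertBy (fun a b => decide (pvKey b < pvKey a)) x s

def pvI (acc : List (List String)) (l : List (List String)) : List (List String) :=
  l.foldl (fun acc x => pvIns x acc) acc

theorem pvSorted_rev_eq_pvI (l : List (List String)) :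
    PySem.List.sorted l pvKey true = pvI [] l := by
  rw [PySem.List.sorted_rev_eq_foldl_insertBy]; rfl

theorem pvIns_nil (x : List String) : pvIns x [] = [x] := by
  simp [pvIns, PySem.List.insertBy]

theorem pvIns_cons (x y : List String) (t : List (List String)) :
    pvIns x (y :: t) = if pvKey y < pvKey x then x :: y :: t else y :: pvIns x t := by
  simp [pvIns, PySem.List.insertBy]

theorem pvIns_comm (a b : List String) (h : pvKey a ≠ pvKey b) (s : List (List String)) :
    pvIns b (pvIns a s) = pvIns a (pvIns b s) := by
  induction s with
  | nil =>
    rcases lt_or_gt_of_ne h with hab | hba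
    · rw [pvIns_nil, pvIns_nil, pvIns_cons, pvIns_cons, if_pos hab, if_neg (not_lt_of_gt hab),
          pvIns_nil]
    · rw [pvIns_nil, pvIns_nil, pvIns_cons, pvIns_cons, if_pos hba, if_neg (not_lt_of_gt hba),
          pvIns_nil]
  | cons y t ih =>
    by_cases hay : pvKey y < pvKey a <;> by_cases hby : pvKey y < pvKey b
    · rcases lt_or_gt_of_ne h with hab | hba
      · rw [pvIns_cons a y t, if_pos hay, pvIns_cons b a (y :: t), if_pos hab,
            pvIns_cons b y t, if_pos hby, pvIns_cons a b (y :: t), if_neg (not_lt_of_gt hab),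
            pvIns_cons a y t, if_pos hay]
      · rw [pvIns_cons a y t, if_pos hay, pvIns_cons b a (y :: t), if_neg (not_lt_of_gt hba),
            pvIns_cons b y t, if_pos hby, pvIns_cons a b (y :: t), if_pos hba]
    · have hba : pvKey b < pvKey a := lt_of_le_of_lt (not_lt.mp hby) hay
      rw [pvIns_cons a y t, if_pos hay, pvIns_cons b a (y :: t), if_neg (not_lt_of_gt hba),
          pvIns_cons b y t, if_neg hby, pvIns_cons a y (pvIns b t), if_pos hay]
    · have hab : pvKey a < pvKey b := lt_of_le_of_lt (not_lt.mp hay) hby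
      rw [pvIns_cons b y t, if_pos hby, pvIns_cons a b (y :: t), if_neg (not_lt_of_gt hab),
          pvIns_cons a y t, if_neg hay, pvIns_cons b y (pvIns a t), if_pos hby]
    · rw [pvIns_cons a y t, if_neg hay, pvIns_cons b y (pvIns a t), if_neg hby,
          pvIns_cons b y t, if_neg hby, pvIns_cons a y (pvIns b t), if_neg hay, ih]

-- ---- structural truncated bubble pass ----
def pvBpassN : Nat → List (List String) → List (List String)
  | 0, l => l
  | _+1, [] => []
  | _+1, [a] => [a]
  | m+1, a :: b :: t =>
    if pvKey a < pvKey b then b :: pvBpassN m (a :: t) else a :: pvBpassN m (b :: t)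

theorem pvBpassN_length : ∀ (m : Nat) (l : List (List String)),
    (pvBpassN m l).length = l.length := by
  intro m
  induction m with
  | zero => intro l; rfl
  | succ m ih =>
    intro l
    match l with
    | [] => rfl
    | [a] => rfl
    | a :: b :: t =>
      rw [pvBpassN]
      split <;> simp [ih]

theorem pvBpassN_perm : ∀ (m : Nat) (l : List (List String)), (pvBpassN m l).Perm l := by
  intro m
  induction m with
  | zero => intro l; exact List.Perm.refl l
  | succ m ih =>
    intro l
    match l with
    | [] => exact List.Perm.refl _
    | [a] => exact List.Perm.refl _
    | a :: b :: t =>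
      rw [pvBpassN]
      split
      · exact ((ih (a :: t)).cons b).trans (List.Perm.swap a b t)
      · exact (ih (b :: t)).cons a

theorem pvI_pass : ∀ (m : Nat) (l acc : List (List String)),
    pvI acc (pvBpassN m l) = pvI acc l := by
  intro m
  induction m with
  | zero => intro l acc; rfl
  | succ m ih =>
    intro l acc
    match l with
    | [] => rfl
    | [a] => rfl
    | a :: b :: t =>
      rw [pvBpassN]
      split
      · rename_i hlt
        show pvI (pvIns b acc) (pvBpassN m (a :: t)) = pvI acc (a :: b :: t)
        rw [ih (a :: t) (pvIns b acc)]
        show pvI (pvIns a (pvIns b acc)) t = pvI (pvIns b (pvIns a acc)) t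
        rw [pvIns_comm a b (ne_of_lt hlt)]
      · show pvI (pvIns a acc) (pvBpassN m (b :: t)) = pvI acc (a :: b :: t)
        rw [ih (b :: t) (pvIns a acc)]
        rfl

theorem pvGetLastD_irrel {α : Type} (r : List α) (d1 d2 : α) (h : r ≠ []) :
    r.getLastD d1 = r.getLastD d2 := by
  cases r with
  | nil => exact absurd rfl h
  | cons x xs => rw [List.getLastD_cons, List.getLastD_cons]

theorem pvBpassN_last_min : ∀ (m : Nat) (l : List (List String)), l.length ≤ m + 1 →
    ∀ y ∈ l, pvKey ((pvBpassN m l).getLastD []) ≤ pvKey y := by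
  intro m
  induction m with
  | zero =>
    intro l hl y hy
    match l with
    | [] => cases hy
    | [a] =>
      rcases List.mem_singleton.mp hy with rfl
      exact le_refl _
    | a :: b :: t => simp at hl
  | succ m ih =>
    intro l hl y hy
    match l with
    | [] => cases hy
    | [a] =>
      rcases List.mem_singleton.mp hy with rfl
      exact le_refl _
    | a :: b :: t =>
      have hlen : (a :: t).length ≤ m + 1 := by simp only [List.length_cons] at hl ⊢; omega
      have hlen2 : (b :: t).length ≤ m + 1 := by simp only [List.length_cons] at hl ⊢; omega
      rw [pvBpassN]
      split
      · rename_i hlt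
        have hne : pvBpassN m (a :: t) ≠ [] := by
          have hL := pvBpassN_length m (a :: t)
          intro hc; rw [hc] at hL; simp at hL
        rw [List.getLastD_cons, pvGetLastD_irrel _ b [] hne]
        have hmin := ih (a :: t) hlen
        rcases List.mem_cons.mp hy with rfl | hy2
        · exact hmin y List.mem_cons_self
        · rcases List.mem_cons.mp hy2 with rfl | hy3
          · exact le_trans (hmin a List.mem_cons_self) (le_of_lt hlt)
          · exact hmin y (List.mem_cons_of_mem a hy3)
      · rename_i hnlt
        have hne : pvBpassN m (b :: t) ≠ [] := by
          have hL := pvBpassN_length m (b :: t)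
          intro hc; rw [hc] at hL; simp at hL
        rw [List.getLastD_cons, pvGetLastD_irrel _ a [] hne]
        have hmin := ih (b :: t) hlen2
        rcases List.mem_cons.mp hy with rfl | hy2
        · exact le_trans (hmin b List.mem_cons_self) (not_lt.mp hnlt)
        · rcases List.mem_cons.mp hy2 with rfl | hy3
          · exact hmin y List.mem_cons_self
          · exact hmin y (List.mem_cons_of_mem b hy3)

theorem pvBpassN_split : ∀ (m : Nat) (u v : List (List String)), m + 1 ≤ u.length →
    pvBpassN m (u ++ v) = pvBpassN m u ++ v := by
  intro m
  induction m with
  | zero => intro u v _; rfl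
  | succ m ih =>
    intro u v hu
    match u with
    | [] => simp only [List.length_nil] at hu; omega
    | [a] => simp only [List.length_cons, List.length_nil] at hu; omega
    | a :: b :: t =>
      have ht : m + 1 ≤ (a :: t).length := by simp only [List.length_cons] at hu ⊢; omega
      have ht2 : m + 1 ≤ (b :: t).length := by simp only [List.length_cons] at hu ⊢; omega
      show pvBpassN (m+1) (a :: b :: (t ++ v)) = pvBpassN (m+1) (a :: b :: t) ++ v
      rw [pvBpassN, pvBpassN]
      split
      · rw [show a :: (t ++ v) = (a :: t) ++ v from rfl, ih (a :: t) v ht]; rfl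
      · rw [show b :: (t ++ v) = (b :: t) ++ v from rfl, ih (b :: t) v ht2]; rfl

-- ---- A's index-based pass equals the structural pass ----
theorem pvStepA_cons (h : List String) (t : List (List String)) (x : Nat) :
    pvStepA (h :: t) (x + 1) = h :: pvStepA t x := by
  simp only [pvStepA, List.getD_cons_succ, List.set_cons_succ]
  split <;> rfl

theorem pvFold_shift : ∀ (m : Nat) (h : List String) (t : List (List String)),
    (List.range m).foldl (fun a x => pvStepA a (x + 1)) (h :: t)
      = h :: (List.range m).foldl pvStepA t := by
  intro m
  induction m with
  | zero => intro h t; rfl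
  | succ m ih =>
    intro h t
    rw [List.range_succ, List.foldl_append, List.foldl_append]
    simp only [List.foldl_cons, List.foldl_nil]
    rw [ih, pvStepA_cons]

theorem pvPass_eq : ∀ (m : Nat) (a : List (List String)), m + 1 ≤ a.length →
    (List.range m).foldl pvStepA a = pvBpassN m a := by
  intro m
  induction m with
  | zero => intro a _; rfl
  | succ m ih =>
    intro a ha
    match a with
    | [] => simp only [List.length_nil] at ha; omega
    | [p] => simp only [List.length_cons, List.length_nil] at ha; omega
    | p :: q :: t =>
      rw [List.range_succ_eq_map]
      simp only [List.foldl_cons, List.foldl_map]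
      have hstep : pvStepA (p :: q :: t) 0
          = if pvKey p < pvKey q then q :: p :: t else p :: q :: t := by
        simp [pvStepA]
      rw [hstep, pvBpassN]
      have hlen : m + 1 ≤ (p :: t).length := by simp only [List.length_cons] at ha ⊢; omega
      have hlen2 : m + 1 ≤ (q :: t).length := by simp only [List.length_cons] at ha ⊢; omega
      split
      · rw [pvFold_shift m q (p :: t), ih (p :: t) hlen]
      · rw [pvFold_shift m p (q :: t), ih (q :: t) hlen2]

-- ---- the outer loop of sort_patient_age ----
def pvPasses (j : Nat) (l : List (List String)) : List (List String) :=
  (List.range j).foldl (fun a z => pvBpassN (j - z) a) l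

theorem pvFold_inner : ∀ (zs : List Nat) (n : Nat) (a : List (List String)), a.length = n →
    zs.foldl (fun a z => (List.range (n - z - 1)).foldl pvStepA a) a
      = zs.foldl (fun a z => pvBpassN (n - z - 1) a) a := by
  intro zs
  induction zs with
  | nil => intro n a _; rfl
  | cons z zs ih =>
    intro n a hn
    simp only [List.foldl_cons]
    have hstep : (List.range (n - z - 1)).foldl pvStepA a = pvBpassN (n - z - 1) a := by
      by_cases h0 : n - z - 1 = 0
      · rw [h0]; rfl
      · exact pvPass_eq (n - z - 1) a (by omega)
    rw [hstep]
    exact ih n _ (by rw [pvBpassN_length, hn])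

theorem pvSort_age_eq (l : List (List String)) :
    sort_patient_age l = pvPasses (l.length - 1) l := by
  unfold sort_patient_age pvPasses
  rw [pvFold_inner (List.range (l.length - 1)) l.length l rfl]
  have hfun : (fun (a : List (List String)) (z : Nat) => pvBpassN (l.length - z - 1) a)
      = fun a z => pvBpassN (l.length - 1 - z) a := by
    funext a z
    have hz : l.length - z - 1 = l.length - 1 - z := by omega
    rw [hz]
  rw [hfun]

theorem pvFold_split : ∀ (zs : List Nat) (g : Nat → Nat) (u v : List (List String)),
    (∀ z ∈ zs, g z + 1 ≤ u.length) →
    zs.foldl (fun a z => pvBpassN (g z) a) (u ++ v)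
      = (zs.foldl (fun a z => pvBpassN (g z) a) u) ++ v := by
  intro zs
  induction zs with
  | nil => intro g u v _; rfl
  | cons z zs ih =>
    intro g u v hz
    simp only [List.foldl_cons]
    rw [pvBpassN_split (g z) u v (hz z List.mem_cons_self)]
    exact ih g _ v (fun z' hz' => by
      rw [pvBpassN_length]; exact hz z' (List.mem_cons_of_mem z hz'))

theorem pvDropLast_lastD : ∀ (p : List (List String)), p ≠ [] →
    p.dropLast ++ [p.getLastD []] = p := by
  intro p
  induction p with
  | nil => intro h; exact absurd rfl h
  | cons x xs ih =>
    intro _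
    cases xs with
    | nil => rfl
    | cons y ys =>
      rw [List.getLastD_cons, pvGetLastD_irrel (y :: ys) x [] (by simp)]
      have hx := ih (by simp)
      calc (x :: y :: ys).dropLast ++ [(y :: ys).getLastD []]
          = x :: ((y :: ys).dropLast ++ [(y :: ys).getLastD []]) := by simp
        _ = x :: y :: ys := by rw [hx]

theorem pvPasses_succ (j : Nat) (l : List (List String)) :
    pvPasses (j + 1) l = pvPasses j (pvBpassN (j + 1) l) := by
  unfold pvPasses
  rw [List.range_succ_eq_map]
  simp only [List.foldl_cons, List.foldl_map, Nat.sub_zero, Nat.succ_sub_succ]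

theorem pvPasses_sorted : ∀ (j : Nat) (l : List (List String)), l.length ≤ j + 1 →
    pvPasses j l = PySem.List.sorted l pvKey true := by
  intro j
  induction j with
  | zero =>
    intro l hl
    match l with
    | [] => rfl
    | [a] => rfl
    | a :: b :: t => simp at hl
  | succ j ih =>
    intro l hl
    rw [pvPasses_succ]
    by_cases hsmall : l.length ≤ j + 1
    · rw [ih (pvBpassN (j+1) l) (by rw [pvBpassN_length]; exact hsmall)]
      rw [pvSorted_rev_eq_pvI, pvSorted_rev_eq_pvI, pvI_pass]
    · have hexact : l.length = j + 2 := by omega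
      have hpne : pvBpassN (j + 1) l ≠ [] := by
        intro hc
        have hL := pvBpassN_length (j + 1) l
        rw [hc] at hL
        simp only [List.length_nil] at hL
        omega
      obtain ⟨u, m, hum, hulen⟩ :
          ∃ u m, u ++ [m] = pvBpassN (j + 1) l ∧ u.length = j + 1 :=
        ⟨(pvBpassN (j + 1) l).dropLast, (pvBpassN (j + 1) l).getLastD [],
          pvDropLast_lastD _ hpne,
          by rw [List.length_dropLast, pvBpassN_length, hexact]; omega⟩
      have hglast : (u ++ [m]).getLastD ([] : List String) = m := by simp
      have hmmin : ∀ y ∈ l, pvKey m ≤ pvKey y := by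
        intro y hyl
        have h := pvBpassN_last_min (j + 1) l (by omega) y hyl
        rw [← hum, hglast] at h
        exact h
      have h1 : pvPasses j (pvBpassN (j + 1) l) = pvPasses j u ++ [m] := by
        rw [← hum]
        unfold pvPasses
        exact pvFold_split (List.range j) (fun z => j - z) u [m]
          (fun z _ => by show j - z + 1 ≤ u.length; rw [hulen]; omega)
      have hins : pvIns m (PySem.List.sorted u pvKey true)
          = PySem.List.sorted u pvKey true ++ [m] := by
        unfold pvIns
        apply PySem.List.insertBy_of_forall_not_before
        intro y hy
        simp only [decide_eq_false_iff_not, not_lt]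
        have hyu : y ∈ u := (PySem.List.mem_sorted _ _ _ _).mp hy
        have hyp : y ∈ pvBpassN (j + 1) l := by
          rw [← hum]; exact List.mem_append_left _ hyu
        exact hmmin y ((pvBpassN_perm (j + 1) l).subset hyp)
      have hconcat : pvI [] (u ++ [m]) = pvIns m (pvI [] u) := by
        unfold pvI
        rw [List.foldl_append]
        rfl
      rw [h1, ih u (le_of_eq hulen), ← hins, pvSorted_rev_eq_pvI u, pvSorted_rev_eq_pvI l,
          ← pvI_pass (j + 1) l [], ← hum, hconcat]

theorem pvSort_age_sorted (l : List (List String)) :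
    sort_patient_age l = PySem.List.sorted l pvKey true := by
  rw [pvSort_age_eq, pvPasses_sorted (l.length - 1) l (by omega)]

-- ---- A's partition loop ----
theorem pvIdx_foldl : ∀ (l : List (List String))
    (s : List (List String) × List (List String) × List (List String) × List (List String)),
    (List.range l.length).foldl (fun s i => pvPartStep s (l.getD i [])) s
      = l.foldl pvPartStep s := by
  intro l
  induction l with
  | nil => intro s; rfl
  | cons a t ih =>
    intro s
    rw [show (a :: t).length = t.length + 1 from rfl, List.range_succ_eq_map]
    simp only [List.foldl_cons, List.foldl_map, List.getD_cons_zero, List.getD_cons_succ]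
    exact ih (pvPartStep s a)

theorem pvPart_buckets : ∀ (l : List (List String))
    (s : List (List String) × List (List String) × List (List String) × List (List String)),
    l.foldl pvPartStep s =
      (s.1 ++ l.filter (fun p => decide (pvPrio p = 0)),
       s.2.1 ++ l.filter (fun p => decide (pvPrio p = 1)),
       s.2.2.1 ++ l.filter (fun p => decide (pvPrio p = 2)),
       s.2.2.2 ++ l.filter (fun p => decide (pvPrio p = 3))) := by
  intro l
  induction l with
  | nil => intro s; obtain ⟨s0, s1, s2, s3⟩ := s; simp
  | cons p t ih =>
    intro s
    rw [List.foldl_cons, ih (pvPartStep s p)]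
    by_cases h1 : "Obese" ∈ p
    · simp [pvPartStep, pvPrio, h1, List.append_assoc]
    · by_cases h2 : "Underweight" ∈ p
      · simp [pvPartStep, pvPrio, h1, h2, List.append_assoc]
      · by_cases h3 : "Overweight" ∈ p
        · simp [pvPartStep, pvPrio, h1, h2, h3, List.append_assoc]
        · by_cases h4 : "Normal" ∈ p
          · simp [pvPartStep, pvPrio, h1, h2, h3, h4, List.append_assoc]
          · simp [pvPartStep, pvPrio, h1, h2, h3, h4]

-- ---- stable descending sort commutes with filter ----
theorem pvSorted_append_singleton (ys : List (List String)) (x : List String) :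
    PySem.List.sorted (ys ++ [x]) pvKey true = pvIns x (PySem.List.sorted ys pvKey true) := by
  rw [pvSorted_rev_eq_pvI, pvSorted_rev_eq_pvI]
  unfold pvI
  rw [List.foldl_append]
  rfl

theorem pvIns_filter : ∀ (s : List (List String)) (x : List String) (q : List String → Bool),
    s.Pairwise (fun a b => pvKey b ≤ pvKey a) →
    (pvIns x s).filter q = if q x then pvIns x (s.filter q) else s.filter q := by
  intro s
  induction s with
  | nil =>
    intro x q _
    rw [pvIns_nil]
    cases hqx : q x <;> simp [hqx, pvIns_nil]
  | cons y t ih =>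
    intro x q hpair
    have hy : ∀ z ∈ t, pvKey z ≤ pvKey y := (List.pairwise_cons.mp hpair).1
    have ht : t.Pairwise (fun a b => pvKey b ≤ pvKey a) := (List.pairwise_cons.mp hpair).2
    have ihx := ih x q ht
    rw [pvIns_cons]
    by_cases hxy : pvKey y < pvKey x
    · rw [if_pos hxy]
      cases hqx : q x
      · simp [List.filter_cons, hqx]
      · have hkey : ∀ z ∈ (y :: t).filter q, pvKey z < pvKey x := by
          intro z hz
          rcases List.mem_cons.mp (List.mem_of_mem_filter hz) with rfl | hzt
          · exact hxy
          · exact lt_of_le_of_lt (hy z hzt) hxy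
        have hfront : pvIns x ((y :: t).filter q) = x :: (y :: t).filter q := by
          cases hs' : (y :: t).filter q with
          | nil => rw [pvIns_nil]
          | cons z r =>
            rw [pvIns_cons, if_pos (hkey z (by rw [hs']; exact List.mem_cons_self))]
        rw [if_pos rfl, hfront]
        simp [List.filter_cons, hqx]
    · rw [if_neg hxy]
      cases hqx : q x <;> cases hqy : q y <;>
        simp [hqx, hqy, ihx, pvIns_cons, hxy]

theorem pvFilter_sorted : ∀ (xs : List (List String)) (q : List String → Bool),
    (PySem.List.sorted xs pvKey true).filter q
      = PySem.List.sorted (xs.filter q) pvKey true := by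
  intro xs
  induction xs using List.reverseRecOn with
  | nil => intro q; rfl
  | append_singleton ys x ih =>
    intro q
    have hpw : (PySem.List.sorted ys pvKey true).Pairwise (fun a b => pvKey b ≤ pvKey a) :=
      PySem.List.sorted_pairwise_rev ys pvKey
    rw [pvSorted_append_singleton, pvIns_filter _ x q hpw, ih q, List.filter_append]
    cases hqx : q x
    · simp [hqx]
    · simp [hqx, pvSorted_append_singleton]

-- ---- ascending stable sort by priority groups the classes ----
def pvInsP (x : List String) (s : List (List String)) : List (List String) :=
  PySem.List.insertBy (fun a b => decide (pvPrio a < pvPrio b)) x s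

theorem pvSortedP_append_singleton (ys : List (List String)) (x : List String) :
    PySem.List.sorted (ys ++ [x]) pvPrio false
      = pvInsP x (PySem.List.sorted ys pvPrio false) := by
  rw [PySem.List.sorted_eq_foldl_insertBy, PySem.List.sorted_eq_foldl_insertBy,
      List.foldl_append]
  rfl

theorem pvInsP_nil (x : List String) : pvInsP x [] = [x] := by
  simp [pvInsP, PySem.List.insertBy]

theorem pvInsP_cons (x y : List String) (t : List (List String)) :
    pvInsP x (y :: t) = if pvPrio x < pvPrio y then x :: y :: t else y :: pvInsP x t := by
  simp [pvInsP, PySem.List.insertBy]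

theorem pvInsP_append : ∀ (u w : List (List String)) (x : List String),
    (∀ y ∈ u, ¬ pvPrio x < pvPrio y) → pvInsP x (u ++ w) = u ++ pvInsP x w := by
  intro u
  induction u with
  | nil => intro w x _; rfl
  | cons y t ih =>
    intro w x hu
    rw [List.cons_append, pvInsP_cons, if_neg (hu y List.mem_cons_self), List.cons_append,
        ih w x (fun z hz => hu z (List.mem_cons_of_mem y hz))]

theorem pvInsP_front : ∀ (w : List (List String)) (x : List String),
    (∀ y ∈ w, pvPrio x < pvPrio y) → pvInsP x w = x :: w := by
  intro w x hw
  cases w with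
  | nil => exact pvInsP_nil x
  | cons y t => rw [pvInsP_cons, if_pos (hw y List.mem_cons_self)]

theorem pvMem_filter_prio (v : Nat) (ys : List (List String)) (y : List String)
    (hy : y ∈ ys.filter (fun p => decide (pvPrio p = v))) : pvPrio y = v := by
  have := List.of_mem_filter hy
  simpa using this

theorem pvGroup : ∀ (ys : List (List String)), (∀ p ∈ ys, pvPrio p < 4) →
    PySem.List.sorted ys pvPrio false =
      ys.filter (fun p => decide (pvPrio p = 0)) ++ ys.filter (fun p => decide (pvPrio p = 1))
        ++ ys.filter (fun p => decide (pvPrio p = 2)) ++ ys.filter (fun p => decide (pvPrio p = 3)) := by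
  intro ys
  induction ys using List.reverseRecOn with
  | nil => intro _; rfl
  | append_singleton ys x ih =>
    intro hall
    have hys : ∀ p ∈ ys, pvPrio p < 4 := fun p hp => hall p (List.mem_append_left _ hp)
    have hx : pvPrio x < 4 := hall x (List.mem_append_right _ List.mem_cons_self)
    rw [pvSortedP_append_singleton, ih hys]
    simp only [List.filter_append, List.filter_cons, List.filter_nil]
    set G0 := ys.filter (fun p => decide (pvPrio p = 0)) with hG0
    set G1 := ys.filter (fun p => decide (pvPrio p = 1)) with hG1
    set G2 := ys.filter (fun p => decide (pvPrio p = 2)) with hG2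
    set G3 := ys.filter (fun p => decide (pvPrio p = 3)) with hG3
    have hm0 : ∀ y ∈ G0, pvPrio y = 0 := fun y hy => pvMem_filter_prio 0 ys y hy
    have hm1 : ∀ y ∈ G1, pvPrio y = 1 := fun y hy => pvMem_filter_prio 1 ys y hy
    have hm2 : ∀ y ∈ G2, pvPrio y = 2 := fun y hy => pvMem_filter_prio 2 ys y hy
    have hm3 : ∀ y ∈ G3, pvPrio y = 3 := fun y hy => pvMem_filter_prio 3 ys y hy
    interval_cases hv : (pvPrio x)
    · -- priority 0: goes to the front of everything
      have hfront : pvInsP x (G0 ++ G1 ++ G2 ++ G3) = G0 ++ (x :: (G1 ++ (G2 ++ G3))) := by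
        rw [List.append_assoc, List.append_assoc]
        rw [pvInsP_append G0 (G1 ++ (G2 ++ G3)) x
          (fun y hy => by rw [hm0 y hy, hv]; omega)]
        rw [pvInsP_front (G1 ++ (G2 ++ G3)) x (fun y hy => by
          rcases List.mem_append.mp hy with h | h
          · rw [hm1 y h, hv]; omega
          · rcases List.mem_append.mp h with h' | h'
            · rw [hm2 y h', hv]; omega
            · rw [hm3 y h', hv]; omega)]
      rw [hfront]
      simp [List.append_assoc]
    · have hfront : pvInsP x (G0 ++ G1 ++ G2 ++ G3) = (G0 ++ G1) ++ (x :: (G2 ++ G3)) := by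
        rw [List.append_assoc (G0 ++ G1)]
        rw [pvInsP_append (G0 ++ G1) (G2 ++ G3) x (fun y hy => by
          rcases List.mem_append.mp hy with h | h
          · rw [hm0 y h, hv]; omega
          · rw [hm1 y h, hv]; omega)]
        rw [pvInsP_front (G2 ++ G3) x (fun y hy => by
          rcases List.mem_append.mp hy with h | h
          · rw [hm2 y h, hv]; omega
          · rw [hm3 y h, hv]; omega)]
      rw [hfront]
      simp [List.append_assoc]
    · have hfront : pvInsP x (G0 ++ G1 ++ G2 ++ G3) = (G0 ++ G1 ++ G2) ++ (x :: G3) := by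
        rw [pvInsP_append (G0 ++ G1 ++ G2) G3 x (fun y hy => by
          rcases List.mem_append.mp hy with h | h
          · rcases List.mem_append.mp h with h' | h'
            · rw [hm0 y h', hv]; omega
            · rw [hm1 y h', hv]; omega
          · rw [hm2 y h, hv]; omega)]
        rw [pvInsP_front G3 x (fun y hy => by rw [hm3 y hy, hv]; omega)]
      rw [hfront]
      simp [List.append_assoc]
    · have hfront : pvInsP x (G0 ++ G1 ++ G2 ++ G3) = (G0 ++ G1 ++ G2 ++ G3) ++ [x] := by
        have h1 : pvInsP x ((G0 ++ G1 ++ G2 ++ G3) ++ []) = (G0 ++ G1 ++ G2 ++ G3) ++ pvInsP x [] := by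
          apply pvInsP_append
          intro y hy
          rcases List.mem_append.mp hy with h | h
          · rcases List.mem_append.mp h with h' | h'
            · rcases List.mem_append.mp h' with h'' | h''
              · rw [hm0 y h'', hv]; omega
              · rw [hm1 y h'', hv]; omega
            · rw [hm2 y h', hv]; omega
          · rw [hm3 y h, hv]; omega
        rw [List.append_nil] at h1
        rw [h1, pvInsP_nil]
      rw [hfront]
      simp [List.append_assoc]

-- ---- final assembly ----
theorem pvFilter_filter (arr : List (List String)) (v : Nat) (hv : v < 4) :
    (arr.filter (fun p => decide (pvPrio p < 4))).filter (fun p => decide (pvPrio p = v))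
      = arr.filter (fun p => decide (pvPrio p = v)) := by
  rw [List.filter_filter]
  apply List.filter_congr
  intro p _
  by_cases hp : pvPrio p = v
  · simp [hp, hv]
  · simp [hp]

theorem pvMain (arr : List (List String)) :
    sorting_patient_weight arr = sorting_patient_weight_alt arr := by
  unfold sorting_patient_weight sorting_patient_weight_alt
  rw [pvIdx_foldl arr ([], [], [], []), pvPart_buckets arr ([], [], [], [])]
  simp only [List.nil_append]
  rw [pvSort_age_sorted, pvSort_age_sorted, pvSort_age_sorted, pvSort_age_sorted]
  have hkey : (fun p : List String => p.getD 1 "") = pvKey := rfl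
  rw [hkey]
  have hk : ∀ p ∈ PySem.List.sorted (arr.filter (fun p => decide (pvPrio p < 4))) pvKey true,
      pvPrio p < 4 := by
    intro p hp
    have hp2 : p ∈ arr.filter (fun p => decide (pvPrio p < 4)) := (PySem.List.mem_sorted _ _ _ _).mp hp
    have := List.of_mem_filter hp2
    simpa using this
  rw [pvGroup _ hk]
  rw [pvFilter_sorted, pvFilter_sorted, pvFilter_sorted, pvFilter_sorted]
  rw [pvFilter_filter arr 0 (by omega), pvFilter_filter arr 1 (by omega),
      pvFilter_filter arr 2 (by omega), pvFilter_filter arr 3 (by omega)]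

-- ===== VERDICT (by name: the statement is the Claim_ definition above) =====
theorem sorting_patient_weight_spec : Claim_equal_sorting_patient_weight := by
  intro arr _ _
  unfold Spec_sorting_patient_weight
  exact pvMain arr
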